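-- pv_equiv track=rewrite | github.com/akhilsingh-4/travels-project-v2 | django/travels/bookings/views.py | _build_location_queries
-- ===== SOURCE A (Python) =====
-- def _build_location_queries(place_name):
--     normalized = place_name.strip()
--     queries = []
--
--     if "," not in normalized:
--         queries.append(f"{normalized}, India")
--     queries.append(normalized)
--
--     seen = set()
--     unique_queries = []
--     for query in queries:
--         key = query.lower()
--         if key not in seen:
--             seen.add(key)
--             unique_queries.append(query)
--
--     return unique_queries
-- ===== SOURCE B (Python) =====
-- def _build_location_queries(place_name):
--     # Direct construction: the two candidate queries can never be
--     # case-insensitive duplicates, so no seen-set pass is needed.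
--     normalized = place_name.strip()
--     if "," in normalized:
--         return [normalized]
--     return [f"{normalized}, India", normalized]
-- ===== Notes on version B (the rewrite author's own statement) =====
-- stated objective: simpler
-- what changed: Replaced the build-list-then-dedup-through-a-lowercased-seen-set pipeline by a direct conditional construction of the result, dropping the set and the filtering loop (the two candidates always differ even case-insensitively, which the proof establishes).
import Mathlib
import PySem

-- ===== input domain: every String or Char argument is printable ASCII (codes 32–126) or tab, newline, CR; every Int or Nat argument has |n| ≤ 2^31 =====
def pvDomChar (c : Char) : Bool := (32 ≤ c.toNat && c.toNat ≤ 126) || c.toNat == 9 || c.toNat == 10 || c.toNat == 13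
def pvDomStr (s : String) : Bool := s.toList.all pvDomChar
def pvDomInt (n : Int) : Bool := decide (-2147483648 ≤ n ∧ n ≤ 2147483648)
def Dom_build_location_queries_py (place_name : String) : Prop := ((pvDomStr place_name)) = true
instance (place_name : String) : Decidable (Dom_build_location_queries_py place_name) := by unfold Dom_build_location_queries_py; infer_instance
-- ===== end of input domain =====

-- B replaces A's build-list-then-dedup-through-a-lowercased-seen-set pipeline by a direct
-- conditional construction of the result list (the dedup pass is provably a no-op).


-- ===== PORT A =====
-- one step of A's dedup loop: state = (seen : set, unique_queries)
def pvDedupStep (st : PySem.Set String × List String) (query : String) :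
    PySem.Set String × List String :=
  let key := PySem.Str.lower query
  if PySem.Set.contains st.1 key then st
  else (PySem.Set.add st.1 key, st.2 ++ [query])

def build_location_queries_py (place_name : String) : List String :=
  let normalized := PySem.Str.strip place_name
  let queries : List String :=
    (if PySem.Str.isIn "," normalized then ([] : List String)
     else [String.ofList (normalized.toList ++ (", India").toList)]) ++ [normalized]
  (queries.foldl pvDedupStep (PySem.Set.empty, [])).2

-- ===== PORT B =====
def build_location_queries_py_alt (place_name : String) : List String :=
  let normalized := PySem.Str.strip place_name
  if PySem.Str.isIn "," normalized then [normalized]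
  else [String.ofList (normalized.toList ++ (", India").toList), normalized]

-- ===== PRECONDITION & SPEC =====
def Spec_build_location_queries_py (place_name : String) (out : List String) : Prop := out = build_location_queries_py_alt place_name
instance (place_name : String) (out : List String) : Decidable (Spec_build_location_queries_py place_name out) := by unfold Spec_build_location_queries_py; infer_instance

-- ===== CLAIM (what is proved, stated in full; the proofs are below) =====
def Claim_equal_build_location_queries_py : Prop := ∀ (place_name : String), Dom_build_location_queries_py place_name → Spec_build_location_queries_py place_name (build_location_queries_py place_name)

-- ===== LEMMAS AND PROOFS =====

-- the two candidate queries are never case-insensitive duplicates: their lengths differ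
lemma pvKey_ne (n : String) :
    PySem.Str.lower (String.ofList (n.toList ++ (", India").toList)) ≠ PySem.Str.lower n := by
  intro h
  have h2 := congrArg (fun s => s.toList.length) h
  simp [PySem.Chars.lower] at h2

-- ===== VERDICT (by name: the statement is the Claim_ definition above) =====
theorem build_location_queries_py_spec : Claim_equal_build_location_queries_py := by
  intro place_name _
  unfold Spec_build_location_queries_py
  simp only [build_location_queries_py, build_location_queries_py_alt]
  generalize PySem.Str.strip place_name = n
  have hk := pvKey_ne n
  cases h : PySem.Str.isIn "," n with
  | true =>
      simp [pvDedupStep, PySem.Set.contains, PySem.Set.empty, PySem.Set.add]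
  | false =>
      simp [pvDedupStep, PySem.Set.contains, PySem.Set.empty, PySem.Set.add]
      simp only [String.ofList_append, String.ofList_toList] at hk
      simp [Ne.symm hk]
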